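-- pv_equiv track=rewrite | github.com/ZJCODE/xAgent | xagent/components/memory/basic_memory.py | _matched_keywords
-- ===== SOURCE A (Python) =====
-- from typing import Any, Dict, List, Optional, Sequence
--
-- def _matched_keywords(content: str, keywords: Sequence[str]) -> List[str]:
--     haystack = str(content or "").casefold()
--     matches: List[str] = []
--     seen: set[str] = set()
--     for keyword in keywords:
--         item = " ".join(str(keyword or "").split()).strip()
--         if not item:
--             continue
--         folded = item.casefold()
--         if folded in seen or folded not in haystack:
--             continue
--         seen.add(folded)
--         matches.append(item)
--     return matches
-- ===== SOURCE B (Python) =====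
-- def _matched_keywords(content, keywords):
--     # Position-scan multi-pattern search: normalize keywords once into (folded, item)
--     # pairs, then walk the folded content position by position, marking each pattern
--     # that starts there; finally emit first-seen items of matched patterns in order.
--     haystack = str(content or "").casefold()
--     pairs = []
--     for keyword in keywords:
--         item = " ".join(str(keyword or "").split()).strip()
--         if item:
--             pairs.append((item.casefold(), item))
--     found = set()
--     for i in range(len(haystack) + 1):
--         for folded, _ in pairs:
--             if folded not in found and haystack.startswith(folded, i):
--                 found.add(folded)
--     out = []
--     emitted = set()
--     for folded, item in pairs:
--         if folded in found and folded not in emitted: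
--             emitted.add(folded)
--             out.append(item)
--     return out
-- ===== Notes on version B (the rewrite author's own statement) =====
-- stated objective: alternative
-- what changed: A tests each keyword against the content with a per-keyword substring scan ('folded in haystack') interleaved with dedup; B inverts the traversal: it normalizes keywords into (folded, item) pairs once, then scans the folded content position by position marking every pattern that starts at that position (multi-pattern position scan), and finally emits first-seen items of matched patterns in keyword order.
import Mathlib
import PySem

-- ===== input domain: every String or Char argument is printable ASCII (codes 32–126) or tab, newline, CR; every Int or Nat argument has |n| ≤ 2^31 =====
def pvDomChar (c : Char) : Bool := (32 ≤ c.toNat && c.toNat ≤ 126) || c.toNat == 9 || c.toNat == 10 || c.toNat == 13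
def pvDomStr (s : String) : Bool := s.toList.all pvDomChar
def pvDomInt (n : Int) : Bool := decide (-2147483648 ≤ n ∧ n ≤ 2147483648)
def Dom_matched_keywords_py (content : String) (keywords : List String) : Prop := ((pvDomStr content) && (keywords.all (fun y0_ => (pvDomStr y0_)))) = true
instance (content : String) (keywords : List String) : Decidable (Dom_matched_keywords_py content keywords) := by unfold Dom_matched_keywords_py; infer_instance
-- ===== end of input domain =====

-- B replaces A's per-keyword substring test ('folded in haystack') by a multi-pattern
-- position scan over the folded content, then emits matched items in keyword order.
-- Python's str.casefold is ported as PySem.Str.lower — exact on the ASCII domain Dom_.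

-- shared normalization: ' '.join(str(keyword or "").split()).strip()
def pvNorm (keyword : String) : String :=
  PySem.Str.strip (PySem.Str.join " " (PySem.Str.split₀ (if keyword == "" then "" else keyword)))

-- ===== PORT A =====
def pvStepA (hay : String) (st : List String × PySem.Set String) (keyword : String) :
    List String × PySem.Set String :=
  let item := pvNorm keyword
  if item == "" then st
  else
    let folded := PySem.Str.lower item
    if PySem.Set.contains st.2 folded || !PySem.Str.isIn folded hay then st
    else (st.1 ++ [item], PySem.Set.add st.2 folded)

def matched_keywords_py (content : String) (keywords : List String) : List String :=
  let haystack := PySem.Str.lower (if content == "" then "" else content)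
  (keywords.foldl (pvStepA haystack) ([], PySem.Set.empty)).1

-- ===== PORT B =====
-- normalization loop: pairs.append((item.casefold(), item)) for nonempty item
def pvPairs (keywords : List String) : List (String × String) :=
  keywords.foldl
    (fun acc keyword =>
      let item := pvNorm keyword
      if item == "" then acc else acc ++ [(PySem.Str.lower item, item)]) []

-- inner loop of the scan at position i; haystack.startswith(folded, i) for
-- 0 ≤ i ≤ len(haystack) is exactly startswith on the drop-i suffix
def pvScanPos (hay : List Char) (i : Nat) (fd : PySem.Set String)
    (pairs : List (String × String)) : PySem.Set String :=
  pairs.foldl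
    (fun fd p =>
      if !(PySem.Set.contains fd p.1) && PySem.Chars.startswith (hay.drop i) p.1.toList
      then PySem.Set.add fd p.1 else fd) fd

def pvScan (hay : List Char) (pairs : List (String × String)) : PySem.Set String :=
  -- for i in range(len(haystack) + 1): … (range over the nonnegative bounds 0..len)
  (List.range (hay.length + 1)).foldl (fun fd i => pvScanPos hay i fd pairs) PySem.Set.empty

def pvStepOut (found : PySem.Set String) (st : List String × PySem.Set String)
    (p : String × String) : List String × PySem.Set String :=
  if PySem.Set.contains found p.1 && !(PySem.Set.contains st.2 p.1)
  then (st.1 ++ [p.2], PySem.Set.add st.2 p.1) else st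

def matched_keywords_py_alt (content : String) (keywords : List String) : List String :=
  let haystack := PySem.Str.lower (if content == "" then "" else content)
  let pairs := pvPairs keywords
  let found := pvScan haystack.toList pairs
  (pairs.foldl (pvStepOut found) ([], PySem.Set.empty)).1

-- ===== PRECONDITION & SPEC =====
def Spec_matched_keywords_py (content : String) (keywords : List String) (out : List String) : Prop := out = matched_keywords_py_alt content keywords
instance (content : String) (keywords : List String) (out : List String) : Decidable (Spec_matched_keywords_py content keywords out) := by unfold Spec_matched_keywords_py; infer_instance

-- ===== CLAIM (what is proved, stated in full; the proofs are below) =====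
def Claim_equal_matched_keywords_py : Prop := ∀ (content : String) (keywords : List String), Dom_matched_keywords_py content keywords → Spec_matched_keywords_py content keywords (matched_keywords_py content keywords)

-- ===== LEMMAS AND PROOFS =====

-- membership after the inner scan loop at one position
lemma pv_scanPos_mem (hay : List Char) (i : Nat) (ps : List (String × String)) :
    ∀ (fd : PySem.Set String) (f : String),
      f ∈ pvScanPos hay i fd ps ↔
        f ∈ fd ∨ ∃ p ∈ ps, p.1 = f ∧ PySem.Chars.startswith (hay.drop i) f.toList = true := by
  induction ps with
  | nil => intro fd f; simp [pvScanPos]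
  | cons p ps ih =>
    intro fd f
    rw [pvScanPos, List.foldl_cons]
    by_cases hc : PySem.Set.contains fd p.1 = true
    · by_cases hf : p.1 = f
      · subst hf
        rw [if_neg (by rw [hc]; simp)]
        have := ih fd p.1
        rw [pvScanPos] at this
        rw [this]
        constructor
        · rintro (h | h)
          · exact Or.inl h
          · exact Or.inr ⟨_, List.mem_cons_of_mem _ h.choose_spec.1, h.choose_spec.2⟩
        · rintro (h | ⟨q, hq, h1, h2⟩)
          · exact Or.inl h
          · rcases List.mem_cons.mp hq with hq | hq
            · exact Or.inl ((PySem.Set.contains_iff fd p.1).mp hc)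
            · exact Or.inr ⟨q, hq, h1, h2⟩
      · rw [if_neg (by rw [hc]; simp)]
        have := ih fd f
        rw [pvScanPos] at this
        rw [this]
        constructor
        · rintro (h | ⟨q, hq, h1, h2⟩)
          · exact Or.inl h
          · exact Or.inr ⟨q, List.mem_cons_of_mem _ hq, h1, h2⟩
        · rintro (h | ⟨q, hq, h1, h2⟩)
          · exact Or.inl h
          · rcases List.mem_cons.mp hq with hq | hq
            · exact absurd (hq ▸ h1) hf
            · exact Or.inr ⟨q, hq, h1, h2⟩
    · have hc' : PySem.Set.contains fd p.1 = false := by simpa using hc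
      by_cases hs : PySem.Chars.startswith (hay.drop i) p.1.toList = true
      · rw [if_pos (by rw [hc', hs]; simp)]
        have := ih (PySem.Set.add fd p.1) f
        rw [pvScanPos] at this
        rw [this, PySem.Set.mem_add]
        constructor
        · rintro ((h | h) | ⟨q, hq, h1, h2⟩)
          · exact Or.inl h
          · exact Or.inr ⟨p, List.mem_cons_self .., by rw [h], by rw [h]; exact hs⟩
          · exact Or.inr ⟨q, List.mem_cons_of_mem _ hq, h1, h2⟩
        · rintro (h | ⟨q, hq, h1, h2⟩)
          · exact Or.inl (Or.inl h)
          · rcases List.mem_cons.mp hq with hq | hq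
            · exact Or.inl (Or.inr (by rw [← h1, hq]))
            · exact Or.inr ⟨q, hq, h1, h2⟩
      · have hs' : PySem.Chars.startswith (hay.drop i) p.1.toList = false := by simpa using hs
        rw [if_neg (by rw [hs']; simp)]
        have := ih fd f
        rw [pvScanPos] at this
        rw [this]
        constructor
        · rintro (h | ⟨q, hq, h1, h2⟩)
          · exact Or.inl h
          · exact Or.inr ⟨q, List.mem_cons_of_mem _ hq, h1, h2⟩
        · rintro (h | ⟨q, hq, h1, h2⟩)
          · exact Or.inl h
          · rcases List.mem_cons.mp hq with hq | hq
            · subst hq; rw [h1] at hs'; rw [hs'] at h2; exact absurd h2 (by simp)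
            · exact Or.inr ⟨q, hq, h1, h2⟩

-- closed form of the normalization loop
lemma pvPairs_eq (ks : List String) :
    pvPairs ks = (ks.filter (fun k => !(pvNorm k == ""))).map
      (fun k => (PySem.Str.lower (pvNorm k), pvNorm k)) := by
  unfold pvPairs
  have h := PySem.List.foldl_append_if (fun k => !(pvNorm k == ""))
    (fun k => (PySem.Str.lower (pvNorm k), pvNorm k)) ks []
  rw [List.nil_append] at h
  rw [← h]
  apply PySem.List.foldl_congr_mem
  intro acc x _
  by_cases h : pvNorm x == "" <;> simp only [h] <;> simp

lemma pvPairs_cons (k : String) (ks : List String) :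
    pvPairs (k :: ks) =
      (if pvNorm k == "" then [] else [(PySem.Str.lower (pvNorm k), pvNorm k)]) ++ pvPairs ks := by
  by_cases h : pvNorm k == "" <;> simp [pvPairs_eq, h]

-- membership after the outer fold over any list of positions
lemma pv_scan_fold (hay : List Char) (ps : List (String × String)) :
    ∀ (rng : List Nat) (st : PySem.Set String) (f : String),
      f ∈ rng.foldl (fun fd i => pvScanPos hay i fd ps) st ↔
        f ∈ st ∨ ∃ i ∈ rng, ∃ p ∈ ps, p.1 = f ∧
          PySem.Chars.startswith (hay.drop i) f.toList = true := by
  intro rng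
  induction rng with
  | nil => intro st f; simp
  | cons i rng ih =>
    intro st f
    rw [List.foldl_cons, ih, pv_scanPos_mem]
    constructor
    · rintro ((h | ⟨p, hp, h1, h2⟩) | ⟨j, hj, p, hp, h1, h2⟩)
      · exact Or.inl h
      · exact Or.inr ⟨i, List.mem_cons_self .., p, hp, h1, h2⟩
      · exact Or.inr ⟨j, List.mem_cons_of_mem _ hj, p, hp, h1, h2⟩
    · rintro (h | ⟨j, hj, p, hp, h1, h2⟩)
      · exact Or.inl (Or.inl h)
      · rcases List.mem_cons.mp hj with hj | hj
        · exact Or.inl (Or.inr ⟨p, hp, h1, hj ▸ h2⟩)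
        · exact Or.inr ⟨j, hj, p, hp, h1, h2⟩

-- membership after the whole position scan
lemma pv_scan_mem (hay : List Char) (ps : List (String × String)) (f : String) :
    f ∈ pvScan hay ps ↔
      (∃ p ∈ ps, p.1 = f) ∧ PySem.Chars.isIn f.toList hay = true := by
  unfold pvScan
  rw [pv_scan_fold]
  simp only [PySem.Set.empty, List.not_mem_nil, false_or]
  constructor
  · rintro ⟨i, _, p, hp, h1, h2⟩
    exact ⟨⟨p, hp, h1⟩,
      (PySem.Chars.exists_prefix_drop_iff_isIn f.toList hay).mp
        ⟨i, (PySem.Chars.startswith_iff _ _).mp h2⟩⟩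
  · rintro ⟨⟨p, hp, h1⟩, hin⟩
    obtain ⟨j, hj⟩ := (PySem.Chars.exists_prefix_drop_iff_isIn f.toList hay).mpr hin
    refine ⟨min j hay.length, List.mem_range.mpr (by omega), p, hp, h1,
      (PySem.Chars.startswith_iff _ _).mpr ?_⟩
    by_cases hle : j ≤ hay.length
    · rw [Nat.min_eq_left hle]; exact hj
    · have h0 : List.drop j hay = [] := List.drop_eq_nil_of_le (by omega)
      have hf : f.toList = [] := List.prefix_nil.mp (h0 ▸ hj)
      rw [hf]; exact List.nil_prefix

-- the two output loops agree given the scan characterization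
lemma pv_out_eq (hay : String) (found : PySem.Set String) :
    ∀ (ks : List String) (ms : List String) (seen : PySem.Set String),
      (∀ k ∈ ks, ¬(pvNorm k = "") →
        (PySem.Str.lower (pvNorm k) ∈ found ↔ PySem.Str.isIn (PySem.Str.lower (pvNorm k)) hay = true)) →
      (ks.foldl (pvStepA hay) (ms, seen)).1
        = ((pvPairs ks).foldl (pvStepOut found) (ms, seen)).1 := by
  intro ks
  induction ks with
  | nil => intro ms seen _; simp [pvPairs]
  | cons k ks ih =>
    intro ms seen hmem
    have hks : ∀ k' ∈ ks, ¬(pvNorm k' = "") →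
        (PySem.Str.lower (pvNorm k') ∈ found ↔
          PySem.Str.isIn (PySem.Str.lower (pvNorm k')) hay = true) :=
      fun k' hk' => hmem k' (List.mem_cons_of_mem _ hk')
    rw [List.foldl_cons, pvPairs_cons]
    by_cases hitem : pvNorm k == ""
    · rw [if_pos hitem, List.nil_append]
      have hA : pvStepA hay (ms, seen) k = (ms, seen) := by simp [pvStepA, hitem]
      rw [hA]; exact ih ms seen hks
    · rw [if_neg hitem, List.singleton_append, List.foldl_cons]
      have hitem' : ¬(pvNorm k = "") := by simpa using hitem
      have hiff := hmem k (List.mem_cons_self ..) hitem'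
      by_cases hseen : PySem.Str.lower (pvNorm k) ∈ seen
      · have hA : pvStepA hay (ms, seen) k = (ms, seen) := by simp [pvStepA, hitem, hseen]
        have hB : pvStepOut found (ms, seen) (PySem.Str.lower (pvNorm k), pvNorm k)
            = (ms, seen) := by simp [pvStepOut, hseen]
        rw [hA, hB]; exact ih ms seen hks
      · by_cases hin : PySem.Chars.isIn (PySem.Chars.lower (pvNorm k).toList) hay.toList = true
        · have hfound : PySem.Str.lower (pvNorm k) ∈ found := hiff.mpr (by simpa using hin)
          have hA : pvStepA hay (ms, seen) k
              = (ms ++ [pvNorm k], PySem.Set.add seen (PySem.Str.lower (pvNorm k))) := by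
            simp [pvStepA, hitem, hseen, hin]
          have hB : pvStepOut found (ms, seen) (PySem.Str.lower (pvNorm k), pvNorm k)
              = (ms ++ [pvNorm k], PySem.Set.add seen (PySem.Str.lower (pvNorm k))) := by
            simp [pvStepOut, hfound, hseen]
          rw [hA, hB]; exact ih _ _ hks
        · have hin' : PySem.Chars.isIn (PySem.Chars.lower (pvNorm k).toList) hay.toList = false := by
            simpa using hin
          have hfound : PySem.Str.lower (pvNorm k) ∉ found := fun hf =>
            absurd (hiff.mp hf) (by simp [hin'])
          have hA : pvStepA hay (ms, seen) k = (ms, seen) := by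
            simp [pvStepA, hitem, hin']
          have hB : pvStepOut found (ms, seen) (PySem.Str.lower (pvNorm k), pvNorm k)
              = (ms, seen) := by simp [pvStepOut, hfound]
          rw [hA, hB]; exact ih ms seen hks

-- ===== VERDICT (by name: the statement is the Claim_ definition above) =====
theorem matched_keywords_py_spec : Claim_equal_matched_keywords_py := by
  intro content keywords _
  unfold Spec_matched_keywords_py matched_keywords_py matched_keywords_py_alt
  apply pv_out_eq
  intro k hk hne
  have hp : (PySem.Str.lower (pvNorm k), pvNorm k) ∈ pvPairs keywords := by
    rw [pvPairs_eq]
    exact List.mem_map.mpr ⟨k, List.mem_filter.mpr ⟨hk, by simpa using hne⟩, rfl⟩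
  rw [pv_scan_mem]
  constructor
  · intro h
    simpa using h.2
  · intro hin
    exact ⟨⟨_, hp, rfl⟩, by simpa using hin⟩
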